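-- pv_equiv track=rewrite | github.com/joshmartommarcelino/TestRepository | Codelab_2_Ex_1.py | create_diamond
-- ===== SOURCE A (Python) =====
-- def create_diamond(size):
--     lines = []
--     # Upper half (including middle)
--     for i in range(size):
--         spaces = " " * (size - i - 1)
--         stars = "*" * (2 * i + 1)
--         lines.append(spaces + stars)
--
--     # Lower half
--     for i in range(size - 2, -1, -1):
--         spaces = " " * (size - i - 1)
--         stars = "*" * (2 * i + 1)
--         lines.append(spaces + stars)
--
--     return "\n".join(lines)
-- ===== SOURCE B (Python) =====
-- def create_diamond(size):
--     lines = []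
--     for r in range(2 * size - 1):
--         i = size - 1 - abs(r - (size - 1))
--         lines.append(" " * (size - i - 1) + "*" * (2 * i + 1))
--     return "\n".join(lines)
-- ===== Notes on version B (the rewrite author's own statement) =====
-- stated objective: simpler
-- what changed: Replaces A's two mirrored loops (ascending upper half, descending lower half) by a single pass over all rows that computes each row's star level with an abs-based formula.
import Mathlib
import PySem

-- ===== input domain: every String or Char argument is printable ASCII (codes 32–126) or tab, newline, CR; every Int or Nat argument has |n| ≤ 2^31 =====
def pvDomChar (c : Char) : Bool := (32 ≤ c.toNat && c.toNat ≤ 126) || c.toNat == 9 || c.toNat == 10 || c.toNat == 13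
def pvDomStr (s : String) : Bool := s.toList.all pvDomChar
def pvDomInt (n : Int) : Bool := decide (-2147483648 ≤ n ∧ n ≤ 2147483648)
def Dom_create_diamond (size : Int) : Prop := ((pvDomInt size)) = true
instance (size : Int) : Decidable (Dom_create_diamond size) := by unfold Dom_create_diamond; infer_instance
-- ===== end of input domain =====

-- B folds A's two mirrored half-loops into one pass over all rows with an abs-based level formula (objective: simpler).

-- ===== PORT A =====
-- one diamond line: " " * (size - i - 1) + "*" * (2*i + 1)
def pvLine (size i : Int) : String :=
  String.ofList (PySem.List.pyRepeat [' '] (size - i - 1) ++ PySem.List.pyRepeat ['*'] (2 * i + 1))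

def create_diamond (size : Int) : String :=
  let lines := (PySem.List.pyRange 0 size 1).foldl
    (fun acc i => acc ++ [pvLine size i]) []
  let lines := (PySem.List.pyRange (size - 2) (-1) (-1)).foldl
    (fun acc i => acc ++ [pvLine size i]) lines
  PySem.Str.join "\n" lines

-- ===== PORT B =====
def create_diamond_alt (size : Int) : String :=
  let lines := (PySem.List.pyRange 0 (2 * size - 1) 1).foldl
    (fun acc r => acc ++ [pvLine size (size - 1 - |r - (size - 1)|)]) []
  PySem.Str.join "\n" lines

-- ===== PRECONDITION & SPEC =====
def Spec_create_diamond (size : Int) (out : String) : Prop := out = create_diamond_alt size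
instance (size : Int) (out : String) : Decidable (Spec_create_diamond size out) := by unfold Spec_create_diamond; infer_instance

-- ===== CLAIM (what is proved, stated in full; the proofs are below) =====
def Claim_equal_create_diamond : Prop := ∀ (size : Int), Dom_create_diamond size → Spec_create_diamond size (create_diamond size)

-- ===== LEMMAS AND PROOFS =====

theorem pv_lines_eq (size : Int) :
    (PySem.List.pyRange 0 size 1).map (pvLine size)
      ++ (PySem.List.pyRange (size - 2) (-1) (-1)).map (pvLine size)
    = (PySem.List.pyRange 0 (2 * size - 1) 1).map
        (fun r => pvLine size (size - 1 - |r - (size - 1)|)) := by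
  by_cases h : size ≤ 0
  · rw [PySem.List.pyRange_one_eq_nil (by omega), PySem.List.pyRange_neg_one_eq_nil (by omega),
      PySem.List.pyRange_one_eq_nil (by omega)]
    simp
  · have h' : (0:Int) < size := by omega
    rw [PySem.List.pyRange_one_append 0 size (2 * size - 1) (by omega) (by omega), List.map_append]
    congr 1
    · rw [PySem.List.pyRange_one 0 size]
      simp only [List.map_map]
      refine List.map_congr_left (fun k hk => ?_)
      have hk' : (k : Int) < size := by
        have := List.mem_range.mp hk; omega
      simp only [Function.comp]
      congr 1
      have : |(0 : Int) + k - (size - 1)| = size - 1 - k := by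
        rw [abs_of_nonpos (by omega)]; omega
      rw [this]; omega
    · rw [PySem.List.pyRange_neg_one (size - 2) (-1),
        PySem.List.pyRange_one size (2 * size - 1)]
      simp only [List.map_map]
      have hlen : (size - 2 - (-1)).toNat = (2 * size - 1 - size).toNat := by omega
      rw [hlen]
      refine List.map_congr_left (fun k _ => ?_)
      simp only [Function.comp]
      congr 1
      have : |size + (k : Int) - (size - 1)| = (k : Int) + 1 := by
        rw [abs_of_pos (by omega)]; omega
      rw [this]; omega

-- ===== VERDICT (by name: the statement is the Claim_ definition above) =====
theorem create_diamond_spec : Claim_equal_create_diamond := by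
  intro size _
  unfold Spec_create_diamond create_diamond create_diamond_alt
  simp only [PySem.List.foldl_append_singleton_eq_map, List.nil_append]
  rw [← pv_lines_eq]
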